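-- pv_equiv track=rewrite | github.com/abdelom/oriented_mld | depreciated/.ipynb_checkpoints/oriented_mld-checkpoint.py | internal_incompatibility
-- ===== SOURCE A (Python) =====
-- def internal_incompatibility(genotype1, genotype2, oriented=True):
--     """
--     four gamete test enlarged to discrete recombnation events since genotypes
--     are oriented ( 0 = ancestral state, 1 = derivative state)
--     two genotypes are compatible, there is no breakpoint between them,
--     when they exlude each others or one of them include the other
--     parameters:
--         genotype1, ganotype2, array of int values taken only 0 or 1 as value
--     return:
--         boolean, True if the two sites if there is an incompatible or discrete
--         recombination event between them, then False
--     """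
--     if not oriented:
--         return len(set([*zip(genotype1, genotype2)])) == 4
--     set_genotype_1 = {i for i in range(len(genotype1)) if genotype1[i]}
--     set_genotype_2 = {i for i in range(len(genotype2)) if genotype2[i]}
--     return not (
--     not set_genotype_1.intersection(set_genotype_2) \
--     or set_genotype_1.union(set_genotype_2) == set_genotype_1 \
--     or set_genotype_1.union(set_genotype_2) == set_genotype_2
--     )
-- ===== SOURCE B (Python) =====
-- def internal_incompatibility(genotype1, genotype2, oriented=True):
--     """Single-pass flag version of the four-gamete test (no index sets / set algebra)."""
--     if not oriented:
--         return len({pair for pair in zip(genotype1, genotype2)}) == 4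
--     seen11 = seen10 = seen01 = False
--     for i in range(max(len(genotype1), len(genotype2))):
--         a = genotype1[i] if i < len(genotype1) else 0
--         b = genotype2[i] if i < len(genotype2) else 0
--         if a and b:
--             seen11 = True
--         elif a:
--             seen10 = True
--         elif b:
--             seen01 = True
--     return seen11 and seen10 and seen01
-- ===== Notes on version B (the rewrite author's own statement) =====
-- stated objective: simpler
-- what changed: Replaced the two index sets and the set-algebra test (intersection nonempty, union equal to neither set) with a single pass to the max length that maintains three boolean gamete flags (seen 1/1, 1/0, 0/1, reading out-of-range positions as 0); the unoriented branch still counts distinct zip pairs.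
import Mathlib
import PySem

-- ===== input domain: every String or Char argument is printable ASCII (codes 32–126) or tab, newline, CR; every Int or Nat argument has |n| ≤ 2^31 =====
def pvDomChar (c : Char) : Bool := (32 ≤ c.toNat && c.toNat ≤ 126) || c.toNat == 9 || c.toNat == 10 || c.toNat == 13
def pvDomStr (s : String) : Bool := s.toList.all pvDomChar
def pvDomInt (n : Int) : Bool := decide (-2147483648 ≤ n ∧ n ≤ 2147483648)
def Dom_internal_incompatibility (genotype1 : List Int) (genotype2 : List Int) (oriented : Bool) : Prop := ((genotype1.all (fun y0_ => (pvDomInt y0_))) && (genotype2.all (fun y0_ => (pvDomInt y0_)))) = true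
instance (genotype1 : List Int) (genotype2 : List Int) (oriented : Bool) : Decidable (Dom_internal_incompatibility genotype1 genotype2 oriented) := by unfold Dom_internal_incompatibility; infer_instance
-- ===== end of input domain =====

-- B replaces A's two index sets and set algebra by one flag-maintaining pass (objective: simpler).

-- ===== PORT A =====
-- indexing genotype[i] for i in range(len(genotype)) is always in range, so pyGetD is exact here
def internal_incompatibility (genotype1 : List Int) (genotype2 : List Int) (oriented : Bool) : Bool :=
  if !oriented then
    (PySem.Set.ofList (genotype1.zip genotype2)).length == 4
  else
    let set_genotype_1 : PySem.Set Int :=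
      PySem.Set.ofList ((PySem.List.pyRange 0 (genotype1.length : Int) 1).filter
        (fun i => !(PySem.List.pyGetD genotype1 i 0 == 0)))
    let set_genotype_2 : PySem.Set Int :=
      PySem.Set.ofList ((PySem.List.pyRange 0 (genotype2.length : Int) 1).filter
        (fun i => !(PySem.List.pyGetD genotype2 i 0 == 0)))
    !((PySem.Set.inter set_genotype_1 set_genotype_2).isEmpty
      || PySem.Set.equal (PySem.Set.union set_genotype_1 set_genotype_2) set_genotype_1
      || PySem.Set.equal (PySem.Set.union set_genotype_1 set_genotype_2) set_genotype_2)

-- ===== PORT B =====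
def internal_incompatibility_alt (genotype1 : List Int) (genotype2 : List Int) (oriented : Bool) : Bool :=
  if !oriented then
    (PySem.Set.ofList (genotype1.zip genotype2)).length == 4
  else
    let st := (PySem.List.pyRange 0 ((max genotype1.length genotype2.length : Nat) : Int) 1).foldl
      (fun (st : Bool × Bool × Bool) i =>
        let a := if i < (genotype1.length : Int) then PySem.List.pyGetD genotype1 i 0 else 0
        let b := if i < (genotype2.length : Int) then PySem.List.pyGetD genotype2 i 0 else 0
        if a != 0 && b != 0 then (true, st.2.1, st.2.2)
        else if a != 0 then (st.1, true, st.2.2)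
        else if b != 0 then (st.1, st.2.1, true)
        else st) (false, false, false)
    st.1 && st.2.1 && st.2.2

-- ===== PRECONDITION & SPEC =====
def Spec_internal_incompatibility (genotype1 : List Int) (genotype2 : List Int) (oriented : Bool) (out : Bool) : Prop := out = internal_incompatibility_alt genotype1 genotype2 oriented
instance (genotype1 : List Int) (genotype2 : List Int) (oriented : Bool) (out : Bool) : Decidable (Spec_internal_incompatibility genotype1 genotype2 oriented out) := by unfold Spec_internal_incompatibility; infer_instance

-- ===== CLAIM (what is proved, stated in full; the proofs are below) =====
def Claim_equal_internal_incompatibility : Prop := ∀ (genotype1 : List Int) (genotype2 : List Int) (oriented : Bool), Dom_internal_incompatibility genotype1 genotype2 oriented → Spec_internal_incompatibility genotype1 genotype2 oriented (internal_incompatibility genotype1 genotype2 oriented)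

-- ===== LEMMAS AND PROOFS =====

-- value read at position i with out-of-range treated as 0
def pvA (g : List Int) (i : Int) : Int := if i < (g.length : Int) then PySem.List.pyGetD g i 0 else 0

lemma pv_fold_flags (g1 g2 : List Int) (l : List Int) (st : Bool × Bool × Bool) :
    l.foldl
      (fun (st : Bool × Bool × Bool) i =>
        let a := if i < (g1.length : Int) then PySem.List.pyGetD g1 i 0 else 0
        let b := if i < (g2.length : Int) then PySem.List.pyGetD g2 i 0 else 0
        if a != 0 && b != 0 then (true, st.2.1, st.2.2)
        else if a != 0 then (st.1, true, st.2.2)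
        else if b != 0 then (st.1, st.2.1, true)
        else st) st
    = (st.1 || l.any (fun i => decide (pvA g1 i ≠ 0 ∧ pvA g2 i ≠ 0)),
       st.2.1 || l.any (fun i => decide (pvA g1 i ≠ 0 ∧ pvA g2 i = 0)),
       st.2.2 || l.any (fun i => decide (pvA g1 i = 0 ∧ pvA g2 i ≠ 0))) := by
  induction l generalizing st with
  | nil => simp
  | cons i l ih =>
      simp only [List.foldl_cons, List.any_cons, ih, pvA]
      by_cases h1 : (if i < (g1.length : Int) then PySem.List.pyGetD g1 i 0 else 0) = 0 <;>
        by_cases h2 : (if i < (g2.length : Int) then PySem.List.pyGetD g2 i 0 else 0) = 0 <;>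
          simp [h1, h2]

lemma pv_mem_s (g : List Int) (i : Int) :
    i ∈ PySem.Set.ofList ((PySem.List.pyRange 0 (g.length : Int) 1).filter
        (fun j => !(PySem.List.pyGetD g j 0 == 0)))
    ↔ 0 ≤ i ∧ pvA g i ≠ 0 := by
  simp only [PySem.Set.mem_ofList, List.mem_filter, PySem.List.mem_pyRange_one, pvA]
  constructor
  · rintro ⟨⟨h0, hl⟩, hg⟩
    refine ⟨h0, ?_⟩
    simp only [if_pos hl]
    simpa using hg
  · rintro ⟨h0, hg⟩
    by_cases hl : i < (g.length : Int)
    · simp only [if_pos hl] at hg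
      exact ⟨⟨h0, hl⟩, by simpa using hg⟩
    · simp [if_neg hl] at hg

lemma pv_lt1 (g1 g2 : List Int) (i : Int) (h : pvA g1 i ≠ 0) :
    i < ((max g1.length g2.length : Nat) : Int) := by
  unfold pvA at h
  by_cases hl : i < (g1.length : Int)
  · have : (g1.length : Int) ≤ ((max g1.length g2.length : Nat) : Int) := by push_cast; omega
    omega
  · simp [if_neg hl] at h

lemma pv_lt2 (g1 g2 : List Int) (i : Int) (h : pvA g2 i ≠ 0) :
    i < ((max g1.length g2.length : Nat) : Int) := by
  unfold pvA at h
  by_cases hl : i < (g2.length : Int)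
  · have : (g2.length : Int) ≤ ((max g1.length g2.length : Nat) : Int) := by push_cast; omega
    omega
  · simp [if_neg hl] at h

lemma pv_c1 (g1 g2 : List Int) :
    (PySem.Set.inter
        (PySem.Set.ofList ((PySem.List.pyRange 0 (g1.length : Int) 1).filter
          (fun i => !(PySem.List.pyGetD g1 i 0 == 0))))
        (PySem.Set.ofList ((PySem.List.pyRange 0 (g2.length : Int) 1).filter
          (fun i => !(PySem.List.pyGetD g2 i 0 == 0))))).isEmpty
    = !((PySem.List.pyRange 0 ((max g1.length g2.length : Nat) : Int) 1).any
        (fun i => decide (pvA g1 i ≠ 0 ∧ pvA g2 i ≠ 0))) := by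
  rw [Bool.eq_iff_iff]
  simp only [List.isEmpty_iff, List.eq_nil_iff_forall_not_mem, PySem.Set.mem_inter, pv_mem_s,
    Bool.not_eq_true', List.any_eq_false, decide_eq_true_eq, PySem.List.mem_pyRange_one]
  constructor
  · rintro h i ⟨h0, _⟩ ⟨ha, hb⟩
    exact h i ⟨⟨h0, ha⟩, h0, hb⟩
  · rintro h x ⟨⟨h0, ha⟩, _, hb⟩
    exact h x ⟨h0, pv_lt1 g1 g2 x ha⟩ ⟨ha, hb⟩

lemma pv_c2 (g1 g2 : List Int) :
    PySem.Set.equal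
      (PySem.Set.union
        (PySem.Set.ofList ((PySem.List.pyRange 0 (g1.length : Int) 1).filter
          (fun i => !(PySem.List.pyGetD g1 i 0 == 0))))
        (PySem.Set.ofList ((PySem.List.pyRange 0 (g2.length : Int) 1).filter
          (fun i => !(PySem.List.pyGetD g2 i 0 == 0)))))
      (PySem.Set.ofList ((PySem.List.pyRange 0 (g1.length : Int) 1).filter
          (fun i => !(PySem.List.pyGetD g1 i 0 == 0))))
    = !((PySem.List.pyRange 0 ((max g1.length g2.length : Nat) : Int) 1).any
        (fun i => decide (pvA g1 i = 0 ∧ pvA g2 i ≠ 0))) := by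
  rw [Bool.eq_iff_iff]
  rw [PySem.Set.equal_iff]
  simp only [PySem.Set.mem_union, pv_mem_s, Bool.not_eq_true', List.any_eq_false,
    decide_eq_true_eq, PySem.List.mem_pyRange_one]
  constructor
  · rintro h i ⟨h0, _⟩ ⟨ha, hb⟩
    have := (h i).mp (Or.inr ⟨h0, hb⟩)
    exact this.2 ha
  · intro h x
    constructor
    · rintro (h1 | h2)
      · exact h1
      · by_cases ha : pvA g1 x = 0
        · exact absurd ⟨ha, h2.2⟩ (h x ⟨h2.1, pv_lt2 g1 g2 x h2.2⟩)
        · exact ⟨h2.1, ha⟩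
    · exact Or.inl

lemma pv_c3 (g1 g2 : List Int) :
    PySem.Set.equal
      (PySem.Set.union
        (PySem.Set.ofList ((PySem.List.pyRange 0 (g1.length : Int) 1).filter
          (fun i => !(PySem.List.pyGetD g1 i 0 == 0))))
        (PySem.Set.ofList ((PySem.List.pyRange 0 (g2.length : Int) 1).filter
          (fun i => !(PySem.List.pyGetD g2 i 0 == 0)))))
      (PySem.Set.ofList ((PySem.List.pyRange 0 (g2.length : Int) 1).filter
          (fun i => !(PySem.List.pyGetD g2 i 0 == 0))))
    = !((PySem.List.pyRange 0 ((max g1.length g2.length : Nat) : Int) 1).any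
        (fun i => decide (pvA g1 i ≠ 0 ∧ pvA g2 i = 0))) := by
  rw [Bool.eq_iff_iff]
  rw [PySem.Set.equal_iff]
  simp only [PySem.Set.mem_union, pv_mem_s, Bool.not_eq_true', List.any_eq_false,
    decide_eq_true_eq, PySem.List.mem_pyRange_one]
  constructor
  · rintro h i ⟨h0, _⟩ ⟨ha, hb⟩
    have := (h i).mp (Or.inl ⟨h0, ha⟩)
    exact this.2 hb
  · intro h x
    constructor
    · rintro (h1 | h2)
      · by_cases hb : pvA g2 x = 0
        · exact absurd ⟨h1.2, hb⟩ (h x ⟨h1.1, pv_lt1 g1 g2 x h1.2⟩)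
        · exact ⟨h1.1, hb⟩
      · exact h2
    · exact Or.inr

lemma pv_oriented_eq (g1 g2 : List Int) :
    internal_incompatibility g1 g2 true = internal_incompatibility_alt g1 g2 true := by
  unfold internal_incompatibility internal_incompatibility_alt
  simp only [Bool.not_true, Bool.false_eq_true, if_false, pv_fold_flags, Bool.false_or,
    pv_c1, pv_c2, pv_c3, Bool.not_or, Bool.not_not]
  cases h1 : (PySem.List.pyRange 0 ((max g1.length g2.length : Nat) : Int) 1).any
      (fun i => decide (pvA g1 i ≠ 0 ∧ pvA g2 i ≠ 0)) <;>
    cases h2 : (PySem.List.pyRange 0 ((max g1.length g2.length : Nat) : Int) 1).any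
      (fun i => decide (pvA g1 i ≠ 0 ∧ pvA g2 i = 0)) <;>
      cases h3 : (PySem.List.pyRange 0 ((max g1.length g2.length : Nat) : Int) 1).any
        (fun i => decide (pvA g1 i = 0 ∧ pvA g2 i ≠ 0)) <;> simp

-- ===== VERDICT (by name: the statement is the Claim_ definition above) =====
theorem internal_incompatibility_spec : Claim_equal_internal_incompatibility := by
  intro g1 g2 oriented _
  unfold Spec_internal_incompatibility
  cases oriented with
  | false => rfl
  | true => exact pv_oriented_eq g1 g2
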